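-- pv_equiv track=rewrite | github.com/SamueleTrainotti/unitn-i2i-radar-sounder-clutter-subsurface-discrimination | thesis/refactor_sentences.py | protect_nested_blocks
-- ===== SOURCE A (Python) =====
-- def protect_nested_blocks(text, command_name, protected_blocks):
--     """
--     Finds all instances of \command_name{...} and protects them,
--     correctly handling nested braces.
--     """
--     search_str = f"\\{command_name}{{"
--     start_idx = 0
--
--     while True:
--         idx = text.find(search_str, start_idx)
--         if idx == -1:
--             break
--
--         # Found the start of the command. Now find the matching closing brace.
--         brace_count = 1
--         pos = idx + len(search_str)
--
--         while pos < len(text) and brace_count > 0: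
--             if text[pos] == '{':
--                 brace_count += 1
--             elif text[pos] == '}':
--                 brace_count -= 1
--             pos += 1
--
--         if brace_count == 0:
--             # We found the full block
--             block = text[idx:pos]
--             protected_blocks.append(block)
--             placeholder = f"__PROTECTED_BLOCK_{len(protected_blocks)-1}__"
--             text = text[:idx] + placeholder + text[pos:]
--             start_idx = idx + len(placeholder)
--         else:
--             # Unbalanced braces? Just move on to avoid infinite loop
--             start_idx = idx + len(search_str)
--
--     return text
-- ===== SOURCE B (Python) =====
-- def protect_nested_blocks(text, command_name, protected_blocks):
--     """Character-by-character state-machine scan over the original text: at each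
--     position either recognise the command start with startswith and consume the
--     whole balanced block, or copy one character; no find() and no rebuilding of
--     the text."""
--     search = "\\" + command_name + "{"
--     out = []
--     i = 0
--     n = len(text)
--     while i < n:
--         if text.startswith(search, i):
--             depth = 1
--             j = i + len(search)
--             while j < n and depth > 0:
--                 if text[j] == '{':
--                     depth += 1
--                 elif text[j] == '}':
--                     depth -= 1
--                 j += 1
--             if depth == 0:
--                 protected_blocks.append(text[i:j])
--                 out.append("__PROTECTED_BLOCK_%d__" % (len(protected_blocks) - 1))
--                 i = j
--             else:
--                 out.append(search)
--                 i += len(search)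
--         else:
--             out.append(text[i])
--             i += 1
--     return "".join(out)
-- ===== Notes on version B (the rewrite author's own statement) =====
-- stated objective: alternative
-- what changed: B replaces A's find-the-next-occurrence, splice-the-placeholder-into-the-text-and-re-search rebuild loop by a character-by-character state-machine pass over the original string that recognises command starts with startswith, consumes balanced blocks, and joins collected pieces once.
import Mathlib
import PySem

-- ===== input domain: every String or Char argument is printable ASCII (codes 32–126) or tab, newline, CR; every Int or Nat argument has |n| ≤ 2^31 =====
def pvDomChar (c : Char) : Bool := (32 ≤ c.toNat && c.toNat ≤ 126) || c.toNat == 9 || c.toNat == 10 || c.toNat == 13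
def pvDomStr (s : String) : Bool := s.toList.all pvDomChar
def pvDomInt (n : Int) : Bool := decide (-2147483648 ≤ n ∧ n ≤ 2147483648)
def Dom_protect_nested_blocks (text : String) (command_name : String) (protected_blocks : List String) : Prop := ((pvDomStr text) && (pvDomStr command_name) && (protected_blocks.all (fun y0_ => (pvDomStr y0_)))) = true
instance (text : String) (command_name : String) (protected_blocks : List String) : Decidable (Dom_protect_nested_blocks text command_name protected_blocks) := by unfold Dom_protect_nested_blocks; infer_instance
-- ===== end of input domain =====

-- B replaces A's find/splice-and-re-search rebuild loop by a character-by-character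
-- state-machine pass over the original string (objective: alternative).
-- Both Pythons append the protected blocks to `protected_blocks` in place; the
-- equivalence proved here is about the RETURN value (both make the same appends).

-- placeholder string f"__PROTECTED_BLOCK_{k}__"
def pvPlaceholder (k : Nat) : List Char :=
  "__PROTECTED_BLOCK_".toList ++ PySem.Int.toChars (k : Int) ++ "__".toList

-- the inner `while pos < len(text) and brace_count > 0` loop of both Pythons,
-- run on the suffix text[pos0:]: returns (number of chars consumed, final brace_count)
def pvBraceScan : List Char → Nat → Nat × Nat
  | _, 0 => (0, 0)
  | [], c => (0, c)
  | ch :: rest, c + 1 =>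
      let c' := if ch = '{' then c + 2 else if ch = '}' then c else c + 1
      let r := pvBraceScan rest c'
      (r.1 + 1, r.2)

theorem pvFindFrom_past_len (s sub : List Char) (k : Nat) (h : s.length < k) :
    PySem.Chars.findFrom s sub (k : Int) none = -1 := by
  simp only [PySem.Chars.findFrom]
  have hk : ¬((k : Int) < 0) := by omega
  rw [if_neg hk, if_pos (by exact_mod_cast h)]

-- bounds at a successful findFrom (used by port A's termination proof)
theorem pvFindFrom_bounds (s sub : List Char) (k : Nat) (hsub : sub ≠ [])
    (h : PySem.Chars.findFrom s sub (k : Int) none ≠ -1) :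
    k ≤ (PySem.Chars.findFrom s sub (k : Int) none).toNat ∧
      (PySem.Chars.findFrom s sub (k : Int) none).toNat + sub.length ≤ s.length := by
  by_cases hk : k ≤ s.length
  · obtain ⟨h1, h2, -⟩ := PySem.Chars.findFrom_natCast_spec s sub k hk h
    have h3 := List.IsPrefix.length_le h2
    have h4 : 0 < sub.length := List.length_pos_iff.mpr hsub
    simp only [List.length_drop] at h3
    omega
  · exact absurd (pvFindFrom_past_len s sub k (by omega)) h

-- small arithmetic lemmas cited by port A's termination proof (kept tiny on purpose)
theorem pvDecSkip (len i idx slen : Nat) (h1 : i ≤ idx) (h2 : idx + slen ≤ len)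
    (hs : 0 < slen) : len - (idx + slen) < len - i := by omega

theorem pvDecSplice (text ph : List Char) (start idx slen c : Nat) (h1 : start ≤ idx)
    (h2 : idx + slen ≤ text.length) (hs : 0 < slen) :
    (PySem.List.slice text none (some (idx : Int)) ++ ph ++
        PySem.List.slice text (some ((idx + slen + c : Nat) : Int)) none).length -
      (idx + ph.length) < text.length - start := by
  simp only [PySem.List.slice_to_natCast, PySem.List.slice_from_natCast, List.length_append,
    List.length_take, List.length_drop]
  omega

-- ===== PORT A =====
def pvALoop (cmd : List Char) (text : List Char) (start : Nat) (blocks : List (List Char)) :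
    List Char :=
  let search := '\\' :: cmd ++ ['{']
  let idxI := PySem.Chars.findFrom text search (start : Int) none
  if h : idxI = -1 then text
  else
    let idx := idxI.toNat
    let pos := idx + search.length + (pvBraceScan (text.drop (idx + search.length)) 1).1
    if (pvBraceScan (text.drop (idx + search.length)) 1).2 = 0 then
      let blocks' := blocks ++ [PySem.List.slice text (some (idx : Int)) (some (pos : Int))]
      let ph := pvPlaceholder (blocks'.length - 1)
      pvALoop cmd
        (PySem.List.slice text none (some (idx : Int)) ++ ph ++
          PySem.List.slice text (some (pos : Int)) none)
        (idx + ph.length) blocks'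
    else
      pvALoop cmd text (idx + search.length) blocks
termination_by text.length - start
decreasing_by
  · exact pvDecSplice text _ start _ _ _
      (pvFindFrom_bounds text _ start (List.cons_ne_nil _ _) h).1
      (pvFindFrom_bounds text _ start (List.cons_ne_nil _ _) h).2
      (List.length_pos_iff.mpr (List.cons_ne_nil _ _))
  · exact pvDecSkip text.length start _ _
      (pvFindFrom_bounds text _ start (List.cons_ne_nil _ _) h).1
      (pvFindFrom_bounds text _ start (List.cons_ne_nil _ _) h).2
      (List.length_pos_iff.mpr (List.cons_ne_nil _ _))

def protect_nested_blocks (text : String) (command_name : String)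
    (protected_blocks : List String) : String :=
  String.mk (pvALoop command_name.toList text.toList 0 (protected_blocks.map String.toList))

-- ===== PORT B =====
-- Source B's `while i < n` loop: recursion on the remaining suffix of the text; at each
-- character either `startswith` recognises the command (consume the balanced block
-- or, unbalanced, just the search string) or one character is copied.
def pvBLoop (cmd : List Char) (rest : List Char) (blocks : List (List Char)) : List Char :=
  match rest with
  | [] => []
  | ch :: tl =>
    let search := '\\' :: cmd ++ ['{']
    if search.isPrefixOf (ch :: tl) then
      let scan := pvBraceScan ((ch :: tl).drop search.length) 1
      if scan.2 = 0 then
        pvPlaceholder blocks.length ++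
          pvBLoop cmd ((ch :: tl).drop (search.length + scan.1))
            (blocks ++ [(ch :: tl).take (search.length + scan.1)])
      else
        search ++ pvBLoop cmd ((ch :: tl).drop search.length) blocks
    else
      ch :: pvBLoop cmd tl blocks
termination_by rest.length
decreasing_by
  · simp only [List.length_drop, List.length_cons, List.length_append, List.length_nil]
    omega
  · simp only [List.length_drop, List.length_cons, List.length_append, List.length_nil]
    omega
  · simp

def protect_nested_blocks_alt (text : String) (command_name : String)
    (protected_blocks : List String) : String :=
  String.mk (pvBLoop command_name.toList text.toList (protected_blocks.map String.toList))

-- ===== PRECONDITION & SPEC =====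
def Spec_protect_nested_blocks (text : String) (command_name : String) (protected_blocks : List String) (out : String) : Prop := out = protect_nested_blocks_alt text command_name protected_blocks
instance (text : String) (command_name : String) (protected_blocks : List String) (out : String) : Decidable (Spec_protect_nested_blocks text command_name protected_blocks out) := by unfold Spec_protect_nested_blocks; infer_instance

-- ===== CLAIM (what is proved, stated in full; the proofs are below) =====
def Claim_equal_protect_nested_blocks : Prop := ∀ (text : String) (command_name : String) (protected_blocks : List String), Dom_protect_nested_blocks text command_name protected_blocks → Spec_protect_nested_blocks text command_name protected_blocks (protect_nested_blocks text command_name protected_blocks)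

-- ===== LEMMAS AND PROOFS =====

-- the common specification both loops are proved to compute: process the suffix
-- `rest`, k = number of blocks protected before it
def pvGo (cmd : List Char) (rest : List Char) (k : Nat) : List Char :=
  let search := '\\' :: cmd ++ ['{']
  let f := PySem.Chars.find rest search
  if h : f = -1 then rest
  else
    let j := f.toNat
    let pos0 := j + search.length
    let c := (pvBraceScan (rest.drop pos0) 1).1
    if (pvBraceScan (rest.drop pos0) 1).2 = 0 then
      rest.take j ++ pvPlaceholder k ++ pvGo cmd (rest.drop (pos0 + c)) (k + 1)
    else
      rest.take pos0 ++ pvGo cmd (rest.drop pos0) k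
termination_by rest.length
decreasing_by
  all_goals
    have h0 : (0:Int) ≤ PySem.Chars.find rest ('\\' :: cmd ++ ['{']) := by
      have h1 := PySem.Chars.neg_one_le_find rest ('\\' :: cmd ++ ['{'])
      simp only [search, f] at h
      omega
    have h2 := (PySem.Chars.find_spec h0).1.length_le
    simp only [search, f, j, pos0, List.length_drop] at *
    have h3 : ('\\' :: cmd ++ ['{']).length = cmd.length + 2 := by simp
    omega

theorem pvFind_nil_eq (sub : List Char) (h : sub ≠ []) : PySem.Chars.find [] sub = -1 := by
  rw [PySem.Chars.find_eq_neg_one_iff]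
  simp [List.infix_iff_prefix_suffix, h]

theorem pvDropApp (pre rest : List Char) (m : Nat) : (pre ++ rest).drop (pre.length + m) = rest.drop m := by
  rw [← List.drop_drop, List.drop_left]

-- find on a list the pattern starts: 0
theorem pvFind_of_prefix (s sub : List Char) (h : sub <+: s) : PySem.Chars.find s sub = 0 := by
  have hinf : sub <:+: s := h.isInfix
  have hne : PySem.Chars.find s sub ≠ -1 := (PySem.Chars.find_ne_neg_one_iff _ _).mpr hinf
  have h0 : (0:Int) ≤ PySem.Chars.find s sub := by
    have := PySem.Chars.neg_one_le_find s sub; omega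
  obtain ⟨-, hmin⟩ := PySem.Chars.find_spec h0
  by_contra hne0
  have hpos : 0 < (PySem.Chars.find s sub).toNat := by omega
  exact hmin 0 hpos (by simpa using h)

-- find on a cons whose head does not start the pattern
theorem pvFind_cons (ch : Char) (tl sub : List Char) (h : ¬ sub <+: (ch :: tl)) :
    PySem.Chars.find (ch :: tl) sub =
      if PySem.Chars.find tl sub = -1 then -1 else PySem.Chars.find tl sub + 1 := by
  by_cases htl : PySem.Chars.find tl sub = -1
  · rw [if_pos htl]
    rw [PySem.Chars.find_eq_neg_one_iff] at htl ⊢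
    intro hinf
    rcases hinf with ⟨pre, suf, heq⟩
    cases pre with
    | nil => exact h ⟨suf, by simpa using heq⟩
    | cons p ps =>
        simp only [List.cons_append, List.cons.injEq, List.append_assoc] at heq
        exact htl ⟨ps, suf, by rw [List.append_assoc]; exact heq.2⟩
  · rw [if_neg htl]
    have h0tl : (0:Int) ≤ PySem.Chars.find tl sub := by
      have := PySem.Chars.neg_one_le_find tl sub; omega
    obtain ⟨hptl, hmintl⟩ := PySem.Chars.find_spec h0tl
    have hinf : sub <:+: (ch :: tl) :=
      (hptl.isInfix.trans (List.drop_suffix _ _).isInfix).trans (List.suffix_cons ch tl).isInfix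
    have hne : PySem.Chars.find (ch :: tl) sub ≠ -1 := (PySem.Chars.find_ne_neg_one_iff _ _).mpr hinf
    have h0 : (0:Int) ≤ PySem.Chars.find (ch :: tl) sub := by
      have := PySem.Chars.neg_one_le_find (ch :: tl) sub; omega
    obtain ⟨hp, hmin⟩ := PySem.Chars.find_spec h0
    set F := (PySem.Chars.find (ch :: tl) sub).toNat with hF
    set G := (PySem.Chars.find tl sub).toNat with hG
    clear_value F G
    have hFpos : 0 < F := by
      by_contra hc
      have hF0 : F = 0 := Nat.eq_zero_of_not_pos hc
      rw [hF0, List.drop_zero] at hp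
      exact h hp
    -- sub <+: (ch::tl).drop F = tl.drop (F-1)
    have hpF : sub <+: tl.drop (F - 1) := by
      have hd : (ch :: tl).drop F = tl.drop (F - 1) := by
        cases F with
        | zero => omega
        | succ m => simp
      rwa [hd] at hp
    have hGle : G ≤ F - 1 := by
      by_contra hc
      exact (hmintl (F - 1) (by omega)) hpF
    have hFle : F ≤ G + 1 := by
      by_contra hc
      have : sub <+: (ch :: tl).drop (G + 1) := by simpa using hptl
      exact hmin (G + 1) (by omega) this
    have : F = G + 1 := by omega
    omega

-- pvGo steps over a character that does not start the pattern
set_option maxRecDepth 8000 in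
theorem pvGo_cons (cmd : List Char) (ch : Char) (tl : List Char) (k : Nat)
    (h : ¬ ('\\' :: cmd ++ ['{']) <+: (ch :: tl)) :
    pvGo cmd (ch :: tl) k = ch :: pvGo cmd tl k := by
  by_cases htl : PySem.Chars.find tl ('\\' :: cmd ++ ['{']) = -1
  · have hc : PySem.Chars.find (ch :: tl) ('\\' :: cmd ++ ['{']) = -1 := by
      rw [pvFind_cons ch tl _ h, if_pos htl]
    rw [pvGo]
    conv_rhs => rw [pvGo]
    dsimp only
    rw [dif_pos hc, dif_pos htl]
  · have h0tl : (0:Int) ≤ PySem.Chars.find tl ('\\' :: cmd ++ ['{']) := by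
      have := PySem.Chars.neg_one_le_find tl ('\\' :: cmd ++ ['{']); omega
    have hc : PySem.Chars.find (ch :: tl) ('\\' :: cmd ++ ['{'])
        = PySem.Chars.find tl ('\\' :: cmd ++ ['{']) + 1 := by
      rw [pvFind_cons ch tl _ h, if_neg htl]
    rw [pvGo]
    conv_rhs => rw [pvGo]
    dsimp only
    rw [hc, dif_neg (by omega : ¬ (PySem.Chars.find tl ('\\' :: cmd ++ ['{']) + 1 = -1)),
        dif_neg htl]
    set G := (PySem.Chars.find tl ('\\' :: cmd ++ ['{'])).toNat with hG
    have hcast : (PySem.Chars.find tl ('\\' :: cmd ++ ['{']) + 1).toNat = G + 1 := by omega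
    simp only [hcast, List.length_cons, List.length_append, List.length_nil]
    have hdrop : ∀ m : Nat, (ch :: tl).drop (G + 1 + m) = tl.drop (G + m) := by
      intro m
      have he : G + 1 + m = (G + m) + 1 := by omega
      simp [he]
    rw [show G + 1 + (cmd.length + 1 + 1) = G + 1 + (cmd.length + 2) by omega,
        hdrop (cmd.length + 2),
        show G + (cmd.length + 1 + 1) = G + (cmd.length + 2) by omega]
    split_ifs with hbal
    · rw [show G + 1 + (cmd.length + 2) +
          (pvBraceScan (tl.drop (G + (cmd.length + 2))) 1).1
          = G + 1 + ((cmd.length + 2) + (pvBraceScan (tl.drop (G + (cmd.length + 2))) 1).1) by omega,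
        hdrop ((cmd.length + 2) + (pvBraceScan (tl.drop (G + (cmd.length + 2))) 1).1),
        show G + ((cmd.length + 2) + (pvBraceScan (tl.drop (G + (cmd.length + 2))) 1).1)
          = G + (cmd.length + 2) + (pvBraceScan (tl.drop (G + (cmd.length + 2))) 1).1 by omega,
        show G + 1 = G + 1 by rfl]
      simp only [List.take_succ_cons, List.cons_append]
    · rw [show G + 1 + (cmd.length + 2) = (G + (cmd.length + 2)) + 1 by omega]
      simp only [List.take_succ_cons, List.cons_append]

theorem pvALoop_eq_go : ∀ (n : Nat) (rest : List Char), rest.length ≤ n →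
    ∀ (pre : List Char) (blocks : List (List Char)) (cmd : List Char),
    pvALoop cmd (pre ++ rest) pre.length blocks = pre ++ pvGo cmd rest blocks.length := by
  intro n
  induction n with
  | zero =>
    intro rest hr pre blocks cmd
    have hnil : rest = [] := List.eq_nil_of_length_eq_zero (by omega)
    subst hnil
    rw [pvALoop, pvGo]
    dsimp only
    rw [PySem.Chars.findFrom_natCast _ _ pre.length (by simp), List.drop_left]
    simp [pvFind_nil_eq]
  | succ n ih =>
    intro rest hr pre blocks cmd
    rw [pvALoop, pvGo]
    dsimp only
    rw [PySem.Chars.findFrom_natCast _ _ pre.length (by simp), List.drop_left]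
    by_cases hf : PySem.Chars.find rest ('\\' :: cmd ++ ['{']) = -1
    · simp only [hf]
      norm_num
    · have h0 : (0:Int) ≤ PySem.Chars.find rest ('\\' :: cmd ++ ['{']) := by
        have := PySem.Chars.neg_one_le_find rest ('\\' :: cmd ++ ['{'])
        omega
      have htn : ((↑pre.length + PySem.Chars.find rest ('\\' :: cmd ++ ['{'])).toNat)
          = pre.length + (PySem.Chars.find rest ('\\' :: cmd ++ ['{'])).toNat := by omega
      simp only [if_neg hf, htn]
      have hne2 : ¬((↑pre.length : Int) + PySem.Chars.find rest ('\\' :: cmd ++ ['{']) = -1) := by omega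
      simp only [dif_neg hne2]
      have hb2 := (PySem.Chars.find_spec h0).1.length_le
      simp only [List.length_drop] at hb2
      have hs1 : 0 < ('\\' :: cmd ++ ['{']).length := by simp
      set j := (PySem.Chars.find rest ('\\' :: cmd ++ ['{'])).toNat with hj
      set s := ('\\' :: cmd ++ ['{']).length with hsdef
      have hjs : j + s ≤ rest.length := by omega
      simp only [PySem.List.slice_to_natCast, PySem.List.slice_from_natCast,
        List.take_length_add_append, List.length_append, List.length_cons, List.length_nil,
        Nat.add_sub_cancel, Nat.add_assoc, pvDropApp]
      split_ifs with hbal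
      · have hL : ((pre ++ List.take j rest) ++ pvPlaceholder blocks.length).length
            = pre.length + (j + (pvPlaceholder blocks.length).length) := by
          simp [List.length_take]
          omega
        rw [show pre.length + (j + (pvPlaceholder blocks.length).length)
            = ((pre ++ List.take j rest) ++ pvPlaceholder blocks.length).length from hL.symm]
        rw [ih (List.drop (j + (s + (pvBraceScan (List.drop (j + s) rest) 1).1)) rest)
          (by simp [List.length_drop]; omega)
          ((pre ++ List.take j rest) ++ pvPlaceholder blocks.length) _ cmd]
        simp [List.append_assoc]
      · rw [show pre ++ rest = (pre ++ List.take (j + s) rest) ++ List.drop (j + s) rest from by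
          rw [List.append_assoc, List.take_append_drop]]
        have hL2 : (pre ++ List.take (j + s) rest).length = pre.length + (j + s) := by
          simp [List.length_take]
          omega
        rw [show pre.length + (j + s) = (pre ++ List.take (j + s) rest).length from hL2.symm]
        rw [ih (List.drop (j + s) rest) (by simp [List.length_drop]; omega)
          (pre ++ List.take (j + s) rest) blocks cmd]
        simp [List.append_assoc]

theorem pvBLoop_eq_go : ∀ (n : Nat) (rest : List Char), rest.length ≤ n →
    ∀ (blocks : List (List Char)) (cmd : List Char),
    pvBLoop cmd rest blocks = pvGo cmd rest blocks.length := by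
  intro n
  induction n with
  | zero =>
    intro rest hr blocks cmd
    have hnil : rest = [] := List.eq_nil_of_length_eq_zero (by omega)
    subst hnil
    rw [pvBLoop, pvGo]
    simp [pvFind_nil_eq]
  | succ n ih =>
    intro rest hr blocks cmd
    match rest, hr with
    | [], _ =>
      rw [pvBLoop, pvGo]
      simp [pvFind_nil_eq]
    | ch :: tl, hr =>
      rw [pvBLoop]
      dsimp only
      by_cases hp : ('\\' :: cmd ++ ['{']) <+: (ch :: tl)
      · rw [if_pos (List.isPrefixOf_iff_prefix.mpr hp)]
        conv_rhs => rw [pvGo]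
        dsimp only
        rw [pvFind_of_prefix _ _ hp]
        rw [dif_neg (by omega : ¬ ((0:Int) = -1))]
        simp only [Int.toNat_zero, Nat.zero_add, List.take_zero, List.nil_append]
        split_ifs with hbal
        · rw [ih ((ch :: tl).drop (('\\' :: cmd ++ ['{']).length +
              (pvBraceScan ((ch :: tl).drop ('\\' :: cmd ++ ['{']).length) 1).1))
            (by simp only [List.length_drop, List.length_cons, List.length_append,
                  List.length_nil] at *; omega)]
          simp
        · rw [ih ((ch :: tl).drop ('\\' :: cmd ++ ['{']).length)
            (by simp only [List.length_drop, List.length_cons, List.length_append,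
                  List.length_nil] at *; omega)]
          rw [← List.prefix_iff_eq_take.mp hp]
      · rw [if_neg (by rw [List.isPrefixOf_iff_prefix]; exact hp)]
        rw [ih tl (by simp at hr; omega) blocks cmd]
        rw [pvGo_cons cmd ch tl blocks.length hp]

-- ===== VERDICT (by name: the statement is the Claim_ definition above) =====
theorem protect_nested_blocks_spec : Claim_equal_protect_nested_blocks := by
  intro text command_name protected_blocks _
  unfold Spec_protect_nested_blocks protect_nested_blocks protect_nested_blocks_alt
  have ha := pvALoop_eq_go text.toList.length text.toList le_rfl [] (protected_blocks.map String.toList) command_name.toList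
  have hb := pvBLoop_eq_go text.toList.length text.toList le_rfl (protected_blocks.map String.toList) command_name.toList
  simp only [List.nil_append, List.length_nil] at ha hb
  rw [ha, hb]
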